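-- pv_equiv track=rewrite | github.com/super30admin/Competitive_Coding-3 | RadioTransmitters.py | hackerlandRadioTransmitters
-- ===== SOURCE A (Python) =====
-- def hackerlandRadioTransmitters(x, k):
--     if (x==[] or len(x)==0):
--         return 0
--     x=sorted(x)
--     count=0
--     i=0
--     while(i<len(x)):
--         range1=x[i]+k
--         count+=1
--         while(i<len(x) and range1>=x[i]):
--             i+=1
--         range1=x[i-1]+k
--         while(i<len(x) and range1>=x[i]):
--             i+=1
--
--     return count
-- ===== SOURCE B (Python) =====
-- def hackerlandRadioTransmitters(x, k):
--     xs = sorted(x)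
--     count = 0
--     while xs:
--         within = [h for h in xs if h <= xs[0] + k]
--         t = within[-1]
--         xs = [h for h in xs if h > t + k]
--         count += 1
--     return count
-- ===== Notes on version B (the rewrite author's own statement) =====
-- stated objective: simpler
-- what changed: Replaces A's index-based outer loop with two nested linear scans per transmitter by a shrinking-list greedy: each round filters the houses within range of the leftmost one, places the transmitter at the last of them, and filters away everything it covers; no indices or inner while loops remain.
import Mathlib
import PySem

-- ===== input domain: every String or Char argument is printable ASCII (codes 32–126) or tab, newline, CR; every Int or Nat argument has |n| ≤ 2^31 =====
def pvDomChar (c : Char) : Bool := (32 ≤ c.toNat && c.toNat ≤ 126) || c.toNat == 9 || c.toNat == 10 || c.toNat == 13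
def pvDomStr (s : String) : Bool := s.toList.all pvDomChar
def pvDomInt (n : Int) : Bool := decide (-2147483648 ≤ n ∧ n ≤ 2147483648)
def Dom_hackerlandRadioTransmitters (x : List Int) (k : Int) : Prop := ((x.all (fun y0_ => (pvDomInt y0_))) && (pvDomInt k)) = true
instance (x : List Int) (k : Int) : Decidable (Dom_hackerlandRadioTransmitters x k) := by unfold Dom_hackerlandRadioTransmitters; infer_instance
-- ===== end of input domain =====

-- B replaces A's index-based sweep (outer while with two inner linear scans) by a shrinking-list
-- greedy: filter the houses within range of the leftmost, place the transmitter at the last of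
-- them, filter away everything covered; objective: simpler (no indices), not claimed faster.

-- ===== PORT A =====
-- while (i < len(x) and range1 >= x[i]): i += 1   (linear scan; terminates since i increases)
def pvAdvance (xs : List Int) (v : Int) (i : Nat) : Nat :=
  if h : i < xs.length ∧ xs.getD i 0 ≤ v then pvAdvance xs v (i + 1) else i
termination_by xs.length - i
decreasing_by omega

-- outer while loop of A; fuel = len(x) suffices on Pre_ (each round advances i by at least 1)
def pvALoop (xs : List Int) (k : Int) (fuel : Nat) (i : Nat) (count : Int) : Int :=
  match fuel with
  | 0 => count
  | f + 1 =>
    if i < xs.length then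
      let i1 := pvAdvance xs (xs.getD i 0 + k) i
      -- x[i-1]: Python indexing (may be negative outside Pre_), exact via pyGetD
      let i2 := pvAdvance xs (PySem.List.pyGetD xs ((i1 : Int) - 1) 0 + k) i1
      pvALoop xs k f i2 (count + 1)
    else count

def hackerlandRadioTransmitters (x : List Int) (k : Int) : Int :=
  if x = [] then 0
  else
    let xs := PySem.List.sorted x (fun a => a) false
    pvALoop xs k xs.length 0 0

-- ===== PORT B =====
-- while xs: within = [h for h in xs if h <= xs[0]+k]; t = within[-1];
--           xs = [h for h in xs if h > t+k]; count += 1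
-- fuel = len(xs) suffices on Pre_ (each round removes at least the head).
-- within[-1] raises in Python when within = [] (only outside Pre_); ported as pyGetD's default.
def pvBLoop (k : Int) (fuel : Nat) (xs : List Int) : Int :=
  match fuel, xs with
  | 0, _ => 0
  | _ + 1, [] => 0
  | f + 1, h :: t =>
    let within := (h :: t).filter (fun y => decide (y ≤ h + k))
    let tp := PySem.List.pyGetD within (-1) 0
    let rest := (h :: t).filter (fun y => decide (tp + k < y))
    1 + pvBLoop k f rest

def hackerlandRadioTransmitters_alt (x : List Int) (k : Int) : Int :=
  let xs := PySem.List.sorted x (fun a => a) false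
  pvBLoop k xs.length xs

-- ===== PRECONDITION & SPEC =====
-- Pre_ excludes nonempty lists with negative k: there A never returns (its inner scans cannot
-- reach the end, so the outer while loops forever) and B's Python raises IndexError on within[-1].
def Pre_hackerlandRadioTransmitters (x : List Int) (k : Int) : Prop := x = [] ∨ 0 ≤ k
instance (x : List Int) (k : Int) : Decidable (Pre_hackerlandRadioTransmitters x k) := by
  unfold Pre_hackerlandRadioTransmitters; infer_instance

def pvWitness_hackerlandRadioTransmitters : List Int × Int := ([1, 5, 10], 2)

def Spec_hackerlandRadioTransmitters (x : List Int) (k : Int) (out : Int) : Prop := out = hackerlandRadioTransmitters_alt x k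
instance (x : List Int) (k : Int) (out : Int) : Decidable (Spec_hackerlandRadioTransmitters x k out) := by unfold Spec_hackerlandRadioTransmitters; infer_instance

-- ===== CLAIM (what is proved, stated in full; the proofs are below) =====
def Claim_equal_hackerlandRadioTransmitters : Prop := ∀ (x : List Int) (k : Int), Dom_hackerlandRadioTransmitters x k → Pre_hackerlandRadioTransmitters x k → Spec_hackerlandRadioTransmitters x k (hackerlandRadioTransmitters x k)

-- ===== LEMMAS AND PROOFS =====

-- monotone access into a sorted list
theorem pvGetD_mono (xs : List Int) (hs : xs.Pairwise (· ≤ ·)) {i j : Nat}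
    (hij : i ≤ j) (hj : j < xs.length) : xs.getD i 0 ≤ xs.getD j 0 := by
  rcases Nat.lt_or_ge i j with h | h
  · have := (List.pairwise_iff_getElem.mp hs) i j (Nat.lt_trans h hj) hj h
    simpa [List.getD_eq_getElem?_getD, List.getElem?_eq_getElem, Nat.lt_trans h hj, hj] using this
  · have : i = j := Nat.le_antisymm hij h
    subst this; exact le_refl _

-- what the linear scan computes
theorem pvAdvance_spec (xs : List Int) (v : Int) (i : Nat) :
    i ≤ pvAdvance xs v i ∧ (i ≤ xs.length → pvAdvance xs v i ≤ xs.length) ∧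
    (∀ j, i ≤ j → j < pvAdvance xs v i → xs.getD j 0 ≤ v) ∧
    (pvAdvance xs v i < xs.length → v < xs.getD (pvAdvance xs v i) 0) := by
  fun_induction pvAdvance xs v i with
  | case1 i h ih =>
    refine ⟨Nat.le_trans (Nat.le_succ i) ih.1, fun _ => ih.2.1 h.1, ?_, ih.2.2.2⟩
    intro j hij hj
    rcases Nat.eq_or_lt_of_le hij with rfl | hlt
    · exact h.2
    · exact ih.2.2.1 j hlt hj
  | case2 i h =>
    refine ⟨le_refl _, fun hi => hi, fun j h1 h2 => absurd h1 (Nat.not_le.mpr h2), fun hi => ?_⟩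
    by_contra hc
    exact h ⟨hi, by omega⟩

-- one unfolding of the scan: if the first element is in range it advances at least one step
theorem pvAdvance_succ_le (xs : List Int) (v : Int) (i : Nat)
    (hi : i < xs.length) (hv : xs.getD i 0 ≤ v) : i + 1 ≤ pvAdvance xs v i := by
  rw [pvAdvance, dif_pos ⟨hi, hv⟩]
  exact (pvAdvance_spec xs v (i + 1)).1

-- a member of a suffix is some xs.getD j 0 with i ≤ j < length
theorem pv_mem_drop {xs : List Int} {i : Nat} {a : Int} (h : a ∈ xs.drop i) :
    ∃ j, i ≤ j ∧ j < xs.length ∧ xs.getD j 0 = a := by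
  obtain ⟨j, hj, he⟩ := List.mem_iff_getElem.mp h
  have hlen : (xs.drop i).length = xs.length - i := List.length_drop
  refine ⟨i + j, by omega, by omega, ?_⟩
  rw [List.getD_eq_getElem xs 0 (by omega)]
  rw [← List.getElem_drop]
  exact he

-- a member of a window take (m-i) of drop i is some xs.getD j 0 with i ≤ j < m
theorem pv_mem_take_drop {xs : List Int} {i m : Nat} {a : Int}
    (h : a ∈ (xs.drop i).take (m - i)) :
    ∃ j, i ≤ j ∧ j < m ∧ j < xs.length ∧ xs.getD j 0 = a := by
  obtain ⟨j, hj, he⟩ := List.mem_iff_getElem.mp h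
  have hlen : ((xs.drop i).take (m - i)).length = min (m - i) (xs.length - i) := by
    simp [List.length_take, List.length_drop]
  rw [List.getElem_take] at he
  have hlen2 : (xs.drop i).length = xs.length - i := List.length_drop
  refine ⟨i + j, by omega, by omega, by omega, ?_⟩
  rw [List.getD_eq_getElem xs 0 (by omega)]
  rw [← List.getElem_drop]
  exact he

-- splitting a suffix at index m
theorem pv_drop_split (xs : List Int) (i m : Nat) (him : i ≤ m) :
    xs.drop i = (xs.drop i).take (m - i) ++ xs.drop m := by
  conv_lhs => rw [← List.take_append_drop (m - i) (xs.drop i)]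
  congr 1
  rw [List.drop_drop]
  congr 1
  omega

-- filter '≤ v' on a suffix of a sorted list is the window up to the first index exceeding v
theorem pv_filter_le (xs : List Int) (hs : xs.Pairwise (· ≤ ·)) (v : Int) (i m : Nat)
    (him : i ≤ m) (hmn : m ≤ xs.length)
    (hle : ∀ j, i ≤ j → j < m → xs.getD j 0 ≤ v)
    (hgt : m < xs.length → v < xs.getD m 0) :
    (xs.drop i).filter (fun y => decide (y ≤ v)) = (xs.drop i).take (m - i) := by
  conv_lhs => rw [pv_drop_split xs i m him]
  rw [List.filter_append]
  have h1 : ((xs.drop i).take (m - i)).filter (fun y => decide (y ≤ v)) = (xs.drop i).take (m - i) := by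
    apply List.filter_eq_self.mpr
    intro a ha
    obtain ⟨j, h1, h2, h3, h4⟩ := pv_mem_take_drop ha
    rw [decide_eq_true_eq, ← h4]
    exact hle j h1 h2
  have h2 : (xs.drop m).filter (fun y => decide (y ≤ v)) = [] := by
    apply List.filter_eq_nil_iff.mpr
    intro a ha
    obtain ⟨j, h1, h2, h3⟩ := pv_mem_drop ha
    have hvlt : v < xs.getD j 0 :=
      lt_of_lt_of_le (hgt (by omega)) (pvGetD_mono xs hs h1 h2)
    simp only [decide_eq_true_eq, ← h3]
    omega
  rw [h1, h2, List.append_nil]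

-- filter '> v' on a suffix of a sorted list is the suffix from the first index exceeding v
theorem pv_filter_gt (xs : List Int) (hs : xs.Pairwise (· ≤ ·)) (v : Int) (i m : Nat)
    (him : i ≤ m) (hmn : m ≤ xs.length)
    (hle : ∀ j, i ≤ j → j < m → xs.getD j 0 ≤ v)
    (hgt : m < xs.length → v < xs.getD m 0) :
    (xs.drop i).filter (fun y => decide (v < y)) = xs.drop m := by
  conv_lhs => rw [pv_drop_split xs i m him]
  rw [List.filter_append]
  have h1 : ((xs.drop i).take (m - i)).filter (fun y => decide (v < y)) = [] := by
    apply List.filter_eq_nil_iff.mpr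
    intro a ha
    obtain ⟨j, hj1, hj2, hj3, hj4⟩ := pv_mem_take_drop ha
    have := hle j hj1 hj2
    simp only [decide_eq_true_eq, ← hj4]
    omega
  have h2 : (xs.drop m).filter (fun y => decide (v < y)) = xs.drop m := by
    apply List.filter_eq_self.mpr
    intro a ha
    obtain ⟨j, hj1, hj2, hj3⟩ := pv_mem_drop ha
    have hvlt : v < xs.getD j 0 :=
      lt_of_lt_of_le (hgt (by omega)) (pvGetD_mono xs hs hj1 hj2)
    simp only [decide_eq_true_eq, ← hj3]
    omega
  rw [h1, h2, List.nil_append]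

-- within[-1] of the window is the house just before the first out-of-range index
theorem pv_take_drop_last (xs : List Int) (i m : Nat) (him : i < m) (hmn : m ≤ xs.length) :
    PySem.List.pyGetD ((xs.drop i).take (m - i)) (-1) 0 = xs.getD (m - 1) 0 := by
  have hlen : ((xs.drop i).take (m - i)).length = m - i := by
    simp [List.length_take, List.length_drop]; omega
  have hne : (xs.drop i).take (m - i) ≠ [] := by
    intro hnil
    rw [hnil] at hlen
    simp at hlen
    omega
  rw [PySem.List.pyGetD_neg_one _ 0 hne, List.getLast_eq_getElem]
  rw [List.getD_eq_getElem xs 0 (by omega)]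
  have h1 : ((xs.drop i).take (m - i))[((xs.drop i).take (m - i)).length - 1]'(by omega) =
      (xs.drop i)[((xs.drop i).take (m - i)).length - 1]'(by simp [List.length_drop]; omega) :=
    List.getElem_take
  rw [h1, List.getElem_drop]
  congr 1
  omega

-- the two loops run in lockstep: A at index i ↔ B on the suffix drop i
theorem pvLoop_eq (xs : List Int) (hs : xs.Pairwise (· ≤ ·)) (k : Int) (hk : 0 ≤ k) :
    ∀ fuel i count, pvALoop xs k fuel i count = count + pvBLoop k fuel (xs.drop i) := by
  intro fuel
  induction fuel with
  | zero => intro i count; simp [pvALoop, pvBLoop]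
  | succ f ih =>
    intro i count
    by_cases hi : i < xs.length
    · have hdropcons : xs.drop i = xs.getD i 0 :: xs.drop (i + 1) := by
        rw [List.drop_eq_getElem_cons hi]
        congr 1
        exact (List.getD_eq_getElem xs 0 hi).symm
      obtain ⟨a1, a2, a3, a4⟩ := pvAdvance_spec xs (xs.getD i 0 + k) i
      set i1 := pvAdvance xs (xs.getD i 0 + k) i with hi1def
      have hi1n : i1 ≤ xs.length := a2 (le_of_lt hi)
      have hii1 : i + 1 ≤ i1 := pvAdvance_succ_le xs (xs.getD i 0 + k) i hi (by omega)
      have hwithin : (xs.drop i).filter (fun y => decide (y ≤ xs.getD i 0 + k)) =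
          (xs.drop i).take (i1 - i) :=
        pv_filter_le xs hs (xs.getD i 0 + k) i i1 (by omega) hi1n a3 a4
      have htp : PySem.List.pyGetD ((xs.drop i).take (i1 - i)) (-1) 0 = xs.getD (i1 - 1) 0 :=
        pv_take_drop_last xs i i1 (by omega) hi1n
      obtain ⟨b1, b2, b3, b4⟩ := pvAdvance_spec xs (xs.getD (i1 - 1) 0 + k) i1
      set i2 := pvAdvance xs (xs.getD (i1 - 1) 0 + k) i1 with hi2def
      have hi2n : i2 ≤ xs.length := b2 hi1n
      have hall2 : ∀ j, i ≤ j → j < i2 → xs.getD j 0 ≤ xs.getD (i1 - 1) 0 + k := by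
        intro j hij hji2
        by_cases hji1 : j < i1
        · have := pvGetD_mono xs hs (show j ≤ i1 - 1 by omega) (show i1 - 1 < xs.length by omega)
          omega
        · exact b3 j (by omega) hji2
      have hrest : (xs.drop i).filter (fun y => decide (xs.getD (i1 - 1) 0 + k < y)) = xs.drop i2 :=
        pv_filter_gt xs hs (xs.getD (i1 - 1) 0 + k) i i2 (by omega) hi2n hall2 b4
      have hcast : PySem.List.pyGetD xs ((i1 : Int) - 1) 0 = xs.getD (i1 - 1) 0 := by
        have h1 : ((i1 : Int) - 1) = ((i1 - 1 : Nat) : Int) := by omega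
        rw [h1, PySem.List.pyGetD_natCast]
      have hA : pvALoop xs k (f + 1) i count = pvALoop xs k f i2 (count + 1) := by
        simp only [pvALoop, if_pos hi, ← hi1def, hcast, ← hi2def]
      have hB : pvBLoop k (f + 1) (xs.drop i) = 1 + pvBLoop k f (xs.drop i2) := by
        conv_lhs => rw [hdropcons]
        simp only [pvBLoop]
        rw [← hdropcons, hwithin, htp, hrest]
      rw [hA, hB, ih i2 (count + 1)]
      omega
    · have hnil : xs.drop i = [] := List.drop_eq_nil_of_le (by omega)
      rw [hnil]
      simp [pvALoop, pvBLoop, hi]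

-- ===== VERDICT (by name: the statement is the Claim_ definition above) =====
theorem hackerlandRadioTransmitters_spec : Claim_equal_hackerlandRadioTransmitters := by
  intro x k _ hpre
  unfold Spec_hackerlandRadioTransmitters hackerlandRadioTransmitters hackerlandRadioTransmitters_alt
  by_cases hx : x = []
  · subst hx
    simp [PySem.List.sorted, pvBLoop]
  · rw [if_neg hx]
    have hk : 0 ≤ k := by
      rcases hpre with h | h
      · exact absurd h hx
      · exact h
    have hs : (PySem.List.sorted x (fun a => a) false).Pairwise (· ≤ ·) := by
      have := PySem.List.sorted_pairwise x (fun a => a)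
      simpa using this
    have := pvLoop_eq _ hs k hk (PySem.List.sorted x (fun a => a) false).length 0 0
    simpa [List.drop_zero] using this
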